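-- pv_equiv track=rewrite | github.com/Afyanalytics-Research-Ltd/dashboard | snowflake/tendri/build_nlp_cleaning.py | _already_covered
-- ===== SOURCE A (Python) =====
-- from typing import List, Optional
--
-- def _already_covered(nlp_term: str, icd10_terms: List[str]) -> bool:
--     nlp_lower = nlp_term.lower()
--     for icd_term in icd10_terms:
--         icd_lower = icd_term.lower()
--         if nlp_lower in icd_lower or icd_lower in nlp_lower:
--             return True
--         nlp_words = set(nlp_lower.split())
--         icd_words = set(icd_lower.split())
--         if nlp_words & icd_words:
--             return True
--     return False
-- ===== SOURCE B (Python) =====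
-- def _already_covered(nlp_term, icd10_terms):
--     nlp_lower = nlp_term.lower()
--     nlp_words = set(nlp_lower.split())
--     if any(nlp_lower in t.lower() or t.lower() in nlp_lower for t in icd10_terms):
--         return True
--     all_words = set()
--     for t in icd10_terms:
--         all_words.update(t.lower().split())
--     return bool(nlp_words & all_words)
-- ===== Notes on version B (the rewrite author's own statement) =====
-- stated objective: alternative
-- what changed: Replaces the single loop doing per-term substring test plus per-term word-set intersection (rebuilding the nlp word set every iteration) with two separate passes: an any() over the substring condition, and one global word index (union of all ICD terms' words) intersected once with the nlp word set built once.
import Mathlib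
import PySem

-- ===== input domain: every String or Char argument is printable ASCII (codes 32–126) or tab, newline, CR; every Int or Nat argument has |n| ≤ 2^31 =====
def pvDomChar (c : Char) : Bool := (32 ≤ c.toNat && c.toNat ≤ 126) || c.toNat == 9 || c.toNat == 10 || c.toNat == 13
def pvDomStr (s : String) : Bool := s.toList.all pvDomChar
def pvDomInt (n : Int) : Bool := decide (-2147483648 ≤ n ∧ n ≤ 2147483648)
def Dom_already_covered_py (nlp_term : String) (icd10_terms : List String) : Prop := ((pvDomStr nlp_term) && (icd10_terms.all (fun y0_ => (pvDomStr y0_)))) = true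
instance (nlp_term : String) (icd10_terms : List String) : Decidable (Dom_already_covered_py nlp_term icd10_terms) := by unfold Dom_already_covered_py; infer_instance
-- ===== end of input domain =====

-- B replaces A's single per-term loop (substring test + per-term word-set intersection)
-- with an any() substring pass plus one global word index intersected once (the nlp word set is built once, not per term).


-- ===== PORT A =====
-- loop over icd10_terms with early return, step for step
def acGoA (nlp_lower : String) (terms : List String) : Bool :=
  match terms with
  | [] => false
  | icd_term :: rest =>
    let icd_lower := PySem.Str.lower icd_term
    if PySem.Str.isIn nlp_lower icd_lower || PySem.Str.isIn icd_lower nlp_lower then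
      true
    else
      let nlp_words := PySem.Set.ofList (PySem.Str.split₀ nlp_lower)
      let icd_words := PySem.Set.ofList (PySem.Str.split₀ icd_lower)
      if !(PySem.Set.inter nlp_words icd_words).isEmpty then
        true
      else
        acGoA nlp_lower rest

def already_covered_py (nlp_term : String) (icd10_terms : List String) : Bool :=
  let nlp_lower := PySem.Str.lower nlp_term
  acGoA nlp_lower icd10_terms

-- ===== PORT B =====
-- the substring condition for one ICD term
def acSub (nlp_lower : String) (t : String) : Bool :=
  PySem.Str.isIn nlp_lower (PySem.Str.lower t) || PySem.Str.isIn (PySem.Str.lower t) nlp_lower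

-- all_words: union of every ICD term's words (the 'for t: all_words.update(...)' loop)
def acAllWords (terms : List String) : PySem.Set String :=
  terms.foldl (fun acc t => PySem.Set.update acc (PySem.Str.split₀ (PySem.Str.lower t))) PySem.Set.empty

def already_covered_py_alt (nlp_term : String) (icd10_terms : List String) : Bool :=
  let nlp_lower := PySem.Str.lower nlp_term
  let nlp_words := PySem.Set.ofList (PySem.Str.split₀ nlp_lower)
  if icd10_terms.any (acSub nlp_lower) then
    true
  else
    !(PySem.Set.inter nlp_words (acAllWords icd10_terms)).isEmpty

-- ===== PRECONDITION & SPEC =====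
def Spec_already_covered_py (nlp_term : String) (icd10_terms : List String) (out : Bool) : Prop := out = already_covered_py_alt nlp_term icd10_terms
instance (nlp_term : String) (icd10_terms : List String) (out : Bool) : Decidable (Spec_already_covered_py nlp_term icd10_terms out) := by unfold Spec_already_covered_py; infer_instance

-- ===== CLAIM (what is proved, stated in full; the proofs are below) =====
def Claim_equal_already_covered_py : Prop := ∀ (nlp_term : String) (icd10_terms : List String), Dom_already_covered_py nlp_term icd10_terms → Spec_already_covered_py nlp_term icd10_terms (already_covered_py nlp_term icd10_terms)

-- ===== LEMMAS AND PROOFS =====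

-- the per-term word-intersection test
def acWordHit (nlp_lower : String) (t : String) : Bool :=
  !(PySem.Set.inter (PySem.Set.ofList (PySem.Str.split₀ nlp_lower))
      (PySem.Set.ofList (PySem.Str.split₀ (PySem.Str.lower t)))).isEmpty

theorem acGoA_eq_any (nl : String) (terms : List String) :
    acGoA nl terms = terms.any (fun t => acSub nl t || acWordHit nl t) := by
  induction terms with
  | nil => rfl
  | cons t rest ih =>
    rw [List.any_cons, ← ih]
    simp only [acGoA]
    split_ifs with h1 h2
    · have hs : acSub nl t = true := h1
      simp [hs]
    · have hw : acWordHit nl t = true := h2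
      simp [hw]
    · rw [Bool.not_eq_true] at h1 h2
      have hs : acSub nl t = false := h1
      have hw : acWordHit nl t = false := h2
      simp [hs, hw]

theorem mem_acAllWords (w : String) (terms : List String) :
    w ∈ acAllWords terms ↔ ∃ t ∈ terms, w ∈ PySem.Str.split₀ (PySem.Str.lower t) := by
  suffices H : ∀ (s : PySem.Set String),
      (w ∈ terms.foldl (fun acc t => PySem.Set.update acc (PySem.Str.split₀ (PySem.Str.lower t))) s
        ↔ w ∈ s ∨ ∃ t ∈ terms, w ∈ PySem.Str.split₀ (PySem.Str.lower t)) by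
    simpa [acAllWords, PySem.Set.empty] using H PySem.Set.empty
  induction terms with
  | nil => simp
  | cons t rest ih =>
    intro s
    simp only [List.foldl_cons, ih, PySem.Set.mem_update, List.exists_mem_cons_iff]
    rw [or_assoc]

theorem interEmpty_all (nl : String) (terms : List String) :
    (!(PySem.Set.inter (PySem.Set.ofList (PySem.Str.split₀ nl)) (acAllWords terms)).isEmpty)
      = terms.any (acWordHit nl) := by
  rw [Bool.eq_iff_iff]
  simp only [acWordHit, Bool.not_eq_true', List.any_eq_true,
    List.isEmpty_eq_false_iff_exists_mem, PySem.Set.mem_inter, mem_acAllWords,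
    PySem.Set.mem_ofList]
  constructor
  · rintro ⟨x, hx, t, ht, hxt⟩
    exact ⟨t, ht, x, hx, hxt⟩
  · rintro ⟨t, ht, x, hx, hxt⟩
    exact ⟨x, hx, t, ht, hxt⟩

-- A's any-over-(sub ∨ wordhit) equals B's if-any-sub-else-any-wordhit shape
theorem any_or_split (nl : String) (terms : List String) :
    terms.any (fun t => acSub nl t || acWordHit nl t)
      = if terms.any (acSub nl) then true else terms.any (acWordHit nl) := by
  by_cases h : terms.any (acSub nl) = true
  · rw [if_pos h]
    simp only [List.any_eq_true, Bool.or_eq_true] at h ⊢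
    obtain ⟨t, ht, hs⟩ := h
    exact ⟨t, ht, Or.inl hs⟩
  · rw [if_neg h, Bool.eq_iff_iff]
    simp only [List.any_eq_true, Bool.or_eq_true] at h ⊢
    push Not at h
    constructor
    · rintro ⟨t, ht, hs | hw⟩
      · exact absurd hs (h t ht)
      · exact ⟨t, ht, hw⟩
    · rintro ⟨t, ht, hw⟩
      exact ⟨t, ht, Or.inr hw⟩

-- ===== VERDICT (by name: the statement is the Claim_ definition above) =====
theorem already_covered_py_spec : Claim_equal_already_covered_py := by
  intro nlp_term icd10_terms _
  unfold Spec_already_covered_py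
  dsimp only [already_covered_py, already_covered_py_alt]
  rw [acGoA_eq_any, interEmpty_all, any_or_split]
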